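-- pv_equiv track=rewrite | github.com/asadraza-69/site_checkup_new | crawler/utils.py | process_dict
-- ===== SOURCE A (Python) =====
-- def process_dict(dictionary):
--     rev_dict = {}
--     meta_url_status = {}
--     new_dict = {}
--     for k,v in dictionary.items():
--         if v is not None and len(v) > 0:
--             new_dict[k] = v
--     dictionary = new_dict
--     for k, v in dictionary.items():
--         meta_url_status[k] = False
--
--     for key, value in dictionary.items():
--         rev_dict.setdefault(value, set()).add(key)
--
--     result = filter(lambda x: len(x) > 1, rev_dict.values())
--     result = list(result)
--     result_list = []
--
--     for data in result:
--         for inner_data in data: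
--             result_list.append(inner_data)
--
--     for k, v in meta_url_status.items():
--         if k in result_list:
--             meta_url_status[k] = True
--
--     return meta_url_status
-- ===== SOURCE B (Python) =====
-- def process_dict(dictionary):
--     items = [(k, v) for k, v in dictionary.items() if v is not None and len(v) > 0]
--     return {k: any(k2 != k and v2 == v for k2, v2 in items) for k, v in items}
-- ===== Notes on version B (the rewrite author's own statement) =====
-- stated objective: simpler
-- what changed: Drops A's reverse value-to-set-of-keys grouping dict, the size filter, the flattening loop and the final membership-marking pass; B keeps the valid entries once and maps each key directly to a pairwise existence check ('some OTHER key carries the same value'), maintaining no auxiliary index at all.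
import Mathlib
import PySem

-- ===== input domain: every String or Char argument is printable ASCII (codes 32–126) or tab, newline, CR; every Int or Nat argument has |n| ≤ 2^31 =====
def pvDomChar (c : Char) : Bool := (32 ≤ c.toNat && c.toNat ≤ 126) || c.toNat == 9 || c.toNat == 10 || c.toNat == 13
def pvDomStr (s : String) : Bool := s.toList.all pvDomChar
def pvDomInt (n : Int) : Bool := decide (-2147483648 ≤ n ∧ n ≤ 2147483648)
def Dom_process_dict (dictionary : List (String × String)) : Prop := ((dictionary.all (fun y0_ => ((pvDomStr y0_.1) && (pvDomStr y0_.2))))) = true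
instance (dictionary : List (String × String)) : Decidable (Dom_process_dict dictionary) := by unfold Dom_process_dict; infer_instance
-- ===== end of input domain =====

-- B drops A's reverse value→set-of-keys grouping dict, size filter, flattening loop and
-- membership-marking pass, mapping each kept key directly to a pairwise existence check
-- ('some other key carries the same value'); simpler, same value.

-- ===== PORT A =====
-- literal port of A; 'v is not None' is always true for a str value, so the guard is len(v) > 0
def process_dict (dictionary : List (String × String)) : List (String × Bool) :=
  let new_dict : PySem.Dict String String :=
    dictionary.foldl (fun d kv => if PySem.Str.len kv.2 > 0 then d.insert kv.1 kv.2 else d)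
      PySem.Dict.empty
  let meta0 : PySem.Dict String Bool :=
    new_dict.items.foldl (fun d kv => d.insert kv.1 false) PySem.Dict.empty
  let rev_dict : PySem.Dict String (PySem.Set String) :=
    new_dict.items.foldl (fun d kv => d.modify kv.2 PySem.Set.empty (fun s => s.add kv.1))
      PySem.Dict.empty
  let result : List (PySem.Set String) := rev_dict.values.filter (fun s => PySem.Set.len s > 1)
  let result_list : List String :=
    result.foldl (fun acc data => data.foldl (fun acc x => acc ++ [x]) acc) []
  let final : PySem.Dict String Bool :=
    meta0.items.foldl (fun m kv => if result_list.contains kv.1 then m.insert kv.1 true else m)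
      meta0
  final.items

-- ===== PORT B =====
def process_dict_alt (dictionary : List (String × String)) : List (String × Bool) :=
  let items : List (String × String) :=
    dictionary.filter (fun kv => decide (PySem.Str.len kv.2 > 0))
  (items.foldl
      (fun (out : PySem.Dict String Bool) kv =>
        out.insert kv.1 (items.any (fun p => p.1 != kv.1 && p.2 == kv.2)))
      PySem.Dict.empty).items

-- ===== PRECONDITION & SPEC =====
-- Pre_ excludes association lists with duplicate keys: such a list does not encode a Python dict
-- (A's parameter is a dict, whose keys are always unique), so nothing is claimed there.
def Pre_process_dict (dictionary : List (String × String)) : Prop :=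
  (dictionary.map Prod.fst).Nodup
instance (dictionary : List (String × String)) : Decidable (Pre_process_dict dictionary) := by
  unfold Pre_process_dict; infer_instance
def pvWitness_process_dict : (List (String × String)) :=
  [("a", "x"), ("b", "x"), ("c", ""), ("d", "y")]
def Spec_process_dict (dictionary : List (String × String)) (out : List (String × Bool)) : Prop :=
  out = process_dict_alt dictionary
instance (dictionary : List (String × String)) (out : List (String × Bool)) :
    Decidable (Spec_process_dict dictionary out) := by unfold Spec_process_dict; infer_instance

-- ===== CLAIM (what is proved, stated in full; the proofs are below) =====
def Claim_equal_process_dict : Prop := ∀ (dictionary : List (String × String)),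
  Dom_process_dict dictionary → Pre_process_dict dictionary →
    Spec_process_dict dictionary (process_dict dictionary)

-- ===== LEMMAS AND PROOFS =====

-- the entries both programs keep: those with a non-empty value
def pvF (dictionary : List (String × String)) : List (String × String) :=
  dictionary.filter (fun kv => decide (PySem.Str.len kv.2 > 0))

-- common normal form of both programs: each kept key, mapped to 'its value occurs on > 1 kept keys'
def pvCanon (dictionary : List (String × String)) : List (String × Bool) :=
  (pvF dictionary).map
    (fun kv => (kv.1, decide (1 < ((pvF dictionary).filter (fun p => p.2 == kv.2)).length)))

theorem pvF_nodup (dictionary : List (String × String))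
    (hnd : (dictionary.map Prod.fst).Nodup) : ((pvF dictionary).map Prod.fst).Nodup :=
  hnd.sublist (List.Sublist.map Prod.fst (List.filter_sublist))

-- A's final loop: conditionally overwriting present keys with `true` rewrites values in place
theorem pv_mark_fold_items (c : String → Bool) :
    ∀ (l : List (String × Bool)) (m : PySem.Dict String Bool),
      (∀ p ∈ l, m.contains p.1 = true) →
      (l.foldl (fun m kv => if c kv.1 then m.insert kv.1 true else m) m).items
        = m.items.map (fun q => if c q.1 ∧ q.1 ∈ l.map Prod.fst then (q.1, true) else q) := by
  intro l
  induction l with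
  | nil => intro m _; simp
  | cons kv t ih =>
    intro m hm
    have hkv : m.contains kv.1 = true := hm kv (List.mem_cons_self ..)
    simp only [List.foldl_cons]
    by_cases hc : c kv.1
    · rw [if_pos hc]
      rw [ih (m.insert kv.1 true)
        (fun p hp => by
          rw [PySem.Dict.contains_insert]
          simp [hm p (List.mem_cons_of_mem _ hp)])]
      rw [PySem.Dict.items_insert_of_contains m true hkv, List.map_map]
      apply List.map_congr_left
      intro q _
      by_cases hq : q.1 = kv.1
      · simp only [Function.comp, hq, beq_self_eq_true, if_pos, List.map_cons]
        simp [hc]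
      · have : (q.1 == kv.1) = false := by simp [hq]
        simp only [Function.comp, this, Bool.false_eq_true, if_false, List.map_cons]
        have : (q.1 ∈ kv.1 :: t.map Prod.fst) ↔ q.1 ∈ t.map Prod.fst := by
          simp [List.mem_cons, hq]
        simp [this]
    · rw [if_neg hc]
      rw [ih m (fun p hp => hm p (List.mem_cons_of_mem _ hp))]
      apply List.map_congr_left
      intro q _
      by_cases hq : q.1 = kv.1
      · have hcc : c q.1 = false := by rw [hq]; exact Bool.eq_false_iff.mpr hc
        simp [hcc]
      · have : (q.1 ∈ kv.1 :: t.map Prod.fst) ↔ q.1 ∈ t.map Prod.fst := by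
          simp [List.mem_cons, hq]
        simp [this]

-- A's setdefault(value, set()).add(key) loop groups the (distinct) keys by value
theorem pv_rev_groups :
    ∀ (l : List (String × String)) (d : PySem.Dict String (PySem.Set String)) (v : String),
      (l.map Prod.fst).Nodup →
      (∀ k w, k ∈ l.map Prod.fst → k ∉ d.getD w PySem.Set.empty) →
      (l.foldl (fun d kv => d.modify kv.2 PySem.Set.empty (fun s => s.add kv.1)) d).getD v
          PySem.Set.empty
        = d.getD v PySem.Set.empty ++ (l.filter (fun kv => kv.2 == v)).map Prod.fst := by
  intro l
  induction l with
  | nil => intro d v _ _; simp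
  | cons kv t ih =>
    intro d v hnd hfresh
    have hnd' : (t.map Prod.fst).Nodup := by simpa using hnd.of_cons
    have hhead : kv.1 ∉ t.map Prod.fst := by
      simp only [List.map_cons, List.nodup_cons] at hnd
      intro h
      obtain ⟨p, hp, hp1⟩ := List.mem_map.1 h
      exact hnd.1 (hp1 ▸ List.mem_map_of_mem hp)
    have hadd : (d.getD kv.2 PySem.Set.empty).add kv.1
        = d.getD kv.2 PySem.Set.empty ++ [kv.1] :=
      PySem.Set.add_of_not_mem (hfresh kv.1 kv.2 (by simp))
    have hstep : ∀ w, (d.modify kv.2 PySem.Set.empty (fun s => s.add kv.1)).getD w PySem.Set.empty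
        = if w = kv.2 then d.getD kv.2 PySem.Set.empty ++ [kv.1] else d.getD w PySem.Set.empty := by
      intro w
      rw [PySem.Dict.getD_modify]
      split_ifs with h
      · exact hadd
      · rfl
    simp only [List.foldl_cons]
    rw [ih _ v hnd' (by
      intro k w hk
      rw [hstep w]
      have hkne : k ≠ kv.1 := by rintro rfl; exact hhead hk
      split_ifs with hw
      · subst hw
        intro hmem
        rcases List.mem_append.1 hmem with h | h
        · exact hfresh k kv.2 (by simp [hk]) h
        · exact hkne (by simpa using h)
      · exact hfresh k w (by simp [hk]))]
    rw [hstep v]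
    by_cases hv : kv.2 = v
    · subst hv
      simp
    · have hb : (kv.2 == v) = false := by simp [hv]
      rw [if_neg (fun h => hv h.symm)]
      simp [hb]

theorem pv_A_char (dictionary : List (String × String))
    (hnd : (dictionary.map Prod.fst).Nodup) :
    process_dict dictionary = pvCanon dictionary := by
  have hFnd := pvF_nodup dictionary hnd
  unfold process_dict
  simp only []
  set ND : PySem.Dict String String :=
    dictionary.foldl (fun d kv => if PySem.Str.len kv.2 > 0 then d.insert kv.1 kv.2 else d)
      PySem.Dict.empty with hND
  have hNDitems : ND.items = pvF dictionary := by
    rw [hND, PySem.List.foldl_ite_eq_foldl_filter]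
    rw [show dictionary.filter (fun x => decide (PySem.Str.len x.2 > 0)) = pvF dictionary from rfl]
    rw [PySem.Dict.items_foldl_insert_fresh (pvF dictionary) (fun kv => kv.1) (fun kv => kv.2)
      PySem.Dict.empty (fun a _ => PySem.Dict.contains_empty _) hFnd]
    simp [show (PySem.Dict.empty : PySem.Dict String String).items = [] from rfl]
  rw [hNDitems]
  set M0 : PySem.Dict String Bool :=
    (pvF dictionary).foldl (fun d kv => d.insert kv.1 false) PySem.Dict.empty with hM0
  have hmitems : M0.items = (pvF dictionary).map (fun kv => (kv.1, false)) := by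
    rw [hM0, PySem.Dict.items_foldl_insert_fresh (pvF dictionary) (fun kv => kv.1)
      (fun _ => false) PySem.Dict.empty (fun a _ => PySem.Dict.contains_empty _) hFnd]
    rfl
  set RV : PySem.Dict String (PySem.Set String) :=
    (pvF dictionary).foldl (fun d kv => d.modify kv.2 PySem.Set.empty (fun s => s.add kv.1))
      PySem.Dict.empty with hRV
  have hgroup : ∀ v, RV.getD v PySem.Set.empty
      = ((pvF dictionary).filter (fun kv => kv.2 == v)).map Prod.fst := by
    intro v
    rw [hRV, pv_rev_groups (pvF dictionary) PySem.Dict.empty v hFnd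
      (fun k w _ h => by simp [PySem.Dict.getD_empty] at h)]
    simp
  set RL : List String :=
    (RV.values.filter (fun s => PySem.Set.len s > 1)).foldl
      (fun acc data => data.foldl (fun acc x => acc ++ [x]) acc) [] with hRL
  have hRL' : RL = (RV.values.filter (fun s => PySem.Set.len s > 1)).flatten := by
    rw [hRL]
    simp only [PySem.List.foldl_append_singleton_eq_self]
    rw [PySem.List.foldl_append_eq_flatten]
    simp
  have hkeys : RV.keys = PySem.Set.ofList ((pvF dictionary).map Prod.snd) := by
    rw [hRV, PySem.Dict.keys_foldl_modify_key (pvF dictionary) (fun kv => kv.2) PySem.Set.empty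
      (fun _ kv => fun s => s.add kv.1) PySem.Dict.empty]
    rfl
  have hknd : RV.keys.Nodup := by rw [hkeys]; exact PySem.Set.nodup_ofList _
  have hvalues : RV.values = RV.keys.map (fun v => RV.getD v PySem.Set.empty) :=
    PySem.Dict.values_eq_map_keys RV hknd _
  have hchar : ∀ kv ∈ pvF dictionary, (kv.1 ∈ RL ↔
      1 < ((pvF dictionary).filter (fun p => p.2 == kv.2)).length) := by
    intro kv hkv
    constructor
    · intro h
      rw [hRL'] at h
      obtain ⟨s, hs, hks⟩ := List.mem_flatten.1 h
      obtain ⟨hsv, hslen⟩ := List.mem_filter.1 hs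
      rw [hvalues] at hsv
      obtain ⟨w, hw, rfl⟩ := List.mem_map.1 hsv
      rw [hgroup w] at hks hslen
      obtain ⟨p, hp, hp1⟩ := List.mem_map.1 hks
      obtain ⟨hpF, hpw⟩ := List.mem_filter.1 hp
      have hpkv : p = kv := List.inj_on_of_nodup_map hFnd hpF hkv hp1
      have hwkv : w = kv.2 := by
        have := eq_of_beq hpw
        rw [← this, hpkv]
      rw [hwkv] at hslen
      simp only [PySem.Set.len, List.length_map] at hslen
      simpa using hslen
    · intro h
      rw [hRL']
      refine List.mem_flatten.2 ⟨RV.getD kv.2 PySem.Set.empty, List.mem_filter.2 ⟨?_, ?_⟩, ?_⟩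
      · rw [hvalues]
        refine List.mem_map_of_mem ?_
        rw [hkeys]
        exact (PySem.Set.mem_ofList _ _).2 (List.mem_map_of_mem hkv)
      · rw [hgroup]
        simp only [PySem.Set.len, List.length_map]
        simpa using h
      · rw [hgroup]
        exact List.mem_map_of_mem (List.mem_filter.2 ⟨hkv, by simp⟩)
  rw [pv_mark_fold_items RL.contains M0.items M0
    (fun p hp => (PySem.Dict.contains_iff_mem_keys M0 p.1).mpr
      (PySem.Dict.mem_keys_of_mem_items M0 hp))]
  rw [hmitems, List.map_map]
  unfold pvCanon
  apply List.map_congr_left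
  intro kv hkv
  have hb : RL.contains kv.1 = decide
      (1 < ((pvF dictionary).filter (fun p => p.2 == kv.2)).length) := by
    rw [show RL.contains kv.1 = decide (kv.1 ∈ RL) from by
      rw [Bool.eq_iff_iff]; simp]
    rw [decide_eq_decide]
    exact hchar kv hkv
  by_cases hx : 1 < ((pvF dictionary).filter (fun p => p.2 == kv.2)).length
  · simp only [Function.comp_apply, hb, hx, decide_true]
    simp
    exact ⟨kv.2, hkv⟩
  · simp only [Function.comp_apply, hb, hx, decide_false]
    simp

-- B's pairwise test: with distinct keys, 'some OTHER kept key has this value' is exactly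
-- 'more than one kept entry has this value'
theorem pv_other_iff (dictionary : List (String × String))
    (hnd : (dictionary.map Prod.fst).Nodup) (kv : String × String) (hkv : kv ∈ pvF dictionary) :
    (pvF dictionary).any (fun p => p.1 != kv.1 && p.2 == kv.2)
      = decide (1 < ((pvF dictionary).filter (fun p => p.2 == kv.2)).length) := by
  have hFnd := pvF_nodup dictionary hnd
  have hsub : ((pvF dictionary).filter (fun p => p.2 == kv.2)).Sublist (pvF dictionary) :=
    List.filter_sublist
  have hlnd : (((pvF dictionary).filter (fun p => p.2 == kv.2)).map Prod.fst).Nodup :=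
    hFnd.sublist (List.Sublist.map Prod.fst hsub)
  set l : List (String × String) := (pvF dictionary).filter (fun p => p.2 == kv.2) with hl
  clear_value l
  have hkvl : kv ∈ l := by rw [hl]; exact List.mem_filter.2 ⟨hkv, by simp⟩
  have hmemF : ∀ p ∈ l, p ∈ pvF dictionary ∧ p.2 = kv.2 := by
    intro p hp
    rw [hl] at hp
    exact ⟨(List.mem_filter.1 hp).1, by simpa using (List.mem_filter.1 hp).2⟩
  have hmem2 : ∀ p, p ∈ pvF dictionary → p.2 = kv.2 → p ∈ l := by
    intro p hp hv
    rw [hl]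
    exact List.mem_filter.2 ⟨hp, by simp [hv]⟩
  rw [Bool.eq_iff_iff]
  simp only [List.any_eq_true, Bool.and_eq_true, bne_iff_ne, beq_iff_eq, decide_eq_true_eq]
  constructor
  · rintro ⟨p, hp, hp1, hp2⟩
    have hpl : p ∈ l := hmem2 p hp hp2
    have hpne : p ≠ kv := fun h => hp1 (by rw [h])
    rcases l with _ | ⟨a, l'⟩
    · exact absurd hkvl (by simp)
    · rcases l' with _ | ⟨b, l''⟩
      · have h1 : p = a := by simpa using hpl
        have h2 : kv = a := by simpa using hkvl
        exact absurd (h1.trans h2.symm) hpne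
      · simp
  · intro hlen
    rcases l with _ | ⟨a, l'⟩
    · simp at hlen
    · rcases l' with _ | ⟨b, l''⟩
      · simp at hlen
      · -- a and b are two kept entries with value kv.2 and (by nodup) distinct keys
        obtain ⟨haF, hav⟩ := hmemF a (by simp)
        obtain ⟨hbF, hbv⟩ := hmemF b (by simp)
        have hab : a.1 ≠ b.1 := by
          simp only [List.map_cons, List.nodup_cons, List.mem_cons] at hlnd
          exact fun h => hlnd.1 (Or.inl h)
        by_cases ha : a.1 = kv.1
        · exact ⟨b, hbF, fun h => hab (ha.trans h.symm), hbv⟩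
        · exact ⟨a, haF, ha, hav⟩

theorem pv_B_char (dictionary : List (String × String))
    (hnd : (dictionary.map Prod.fst).Nodup) :
    process_dict_alt dictionary = pvCanon dictionary := by
  have hFnd := pvF_nodup dictionary hnd
  unfold process_dict_alt
  simp only []
  rw [show dictionary.filter (fun kv => decide (PySem.Str.len kv.2 > 0)) = pvF dictionary from rfl]
  rw [PySem.Dict.items_foldl_insert_fresh (pvF dictionary) (fun kv => kv.1)
    (fun kv => (pvF dictionary).any (fun p => p.1 != kv.1 && p.2 == kv.2)) PySem.Dict.empty
    (fun a _ => PySem.Dict.contains_empty _) hFnd]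
  simp only [show (PySem.Dict.empty : PySem.Dict String Bool).items = [] from rfl,
    List.nil_append]
  unfold pvCanon
  exact List.map_congr_left (fun kv hkv => by rw [pv_other_iff dictionary hnd kv hkv])

-- ===== VERDICT (by name: the statement is the Claim_ definition above) =====
theorem process_dict_spec : Claim_equal_process_dict := by
  intro dictionary _ hpre
  unfold Spec_process_dict
  rw [pv_A_char dictionary hpre, pv_B_char dictionary hpre]
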